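-- pv_equiv track=rewrite | github.com/SaadGtite/Micro-Mouse-Program- | micromouse-3x3-auto.py | _get_cells_in_arc
-- ===== SOURCE A (Python) =====
-- def _get_cells_in_arc(start, end):
--     """Retourne toutes les cellules dans un arc"""
--     cells = []
--     x1, y1 = start
--     x2, y2 = end
--
--     if y1 == y2:  # Mouvement horizontal
--         step = 1 if x2 > x1 else -1
--         for x in range(x1, x2 + step, step):
--             cells.append((x, y1))
--     elif x1 == x2:  # Mouvement vertical
--         step = 1 if y2 > y1 else -1
--         for y in range(y1, y2 + step, step):
--             cells.append((x1, y))
--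
--     return cells
-- ===== SOURCE B (Python) =====
-- def _get_cells_in_arc(start, end):
--     """Retourne toutes les cellules dans un arc"""
--     x1, y1 = start
--     x2, y2 = end
--     if x1 != x2 and y1 != y2:
--         return []
--     cells = []
--     x, y = x2, y2
--     while (x, y) != (x1, y1):
--         cells.append((x, y))
--         if x < x1:
--             x += 1
--         elif x > x1:
--             x -= 1
--         elif y < y1:
--             y += 1
--         else:
--             y -= 1
--     cells.append((x1, y1))
--     cells.reverse()
--     return cells
-- ===== Notes on version B (the rewrite author's own statement) =====
-- stated objective: alternative
-- what changed: Builds the output back-to-front: instead of two axis-specific forward range loops, B walks step by step from the END cell back towards the start with a while loop (no range at all), collecting cells in reverse order, and reverses the accumulator once at the end.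
import Mathlib
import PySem

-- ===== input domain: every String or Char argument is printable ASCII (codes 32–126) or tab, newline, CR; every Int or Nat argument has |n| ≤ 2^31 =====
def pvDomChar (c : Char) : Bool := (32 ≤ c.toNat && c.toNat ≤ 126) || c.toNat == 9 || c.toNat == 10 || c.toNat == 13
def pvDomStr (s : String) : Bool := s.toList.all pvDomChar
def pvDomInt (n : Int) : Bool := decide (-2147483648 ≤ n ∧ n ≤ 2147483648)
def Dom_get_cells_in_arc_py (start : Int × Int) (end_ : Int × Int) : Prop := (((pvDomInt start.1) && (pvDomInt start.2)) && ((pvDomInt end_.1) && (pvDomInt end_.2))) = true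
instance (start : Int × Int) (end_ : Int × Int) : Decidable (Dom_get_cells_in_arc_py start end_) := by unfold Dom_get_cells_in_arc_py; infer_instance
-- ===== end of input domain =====

-- B builds the output back-to-front: a step-by-step walk from the end cell back to the
-- start (no range loops), then one reverse (alternative decomposition, same cost).
-- ===== PORT A =====
def get_cells_in_arc_py (start : Int × Int) (end_ : Int × Int) : List (Int × Int) :=
  let x1 := start.1; let y1 := start.2
  let x2 := end_.1; let y2 := end_.2
  if y1 = y2 then
    let step : Int := if x2 > x1 then 1 else -1
    (PySem.List.pyRange x1 (x2 + step) step).foldl (fun cells x => cells ++ [(x, y1)]) []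
  else if x1 = x2 then
    let step : Int := if y2 > y1 then 1 else -1
    (PySem.List.pyRange y1 (y2 + step) step).foldl (fun cells y => cells ++ [(x1, y)]) []
  else []

-- ===== PORT B =====
-- the while loop of Source B: walk (x,y) one cell at a time towards (x1,y1), appending
def pvWalkBack (x1 y1 x y : Int) (acc : List (Int × Int)) : List (Int × Int) :=
  if x = x1 ∧ y = y1 then acc
  else
    let acc' := acc ++ [(x, y)]
    if x < x1 then pvWalkBack x1 y1 (x + 1) y acc'
    else if x1 < x then pvWalkBack x1 y1 (x - 1) y acc'
    else if y < y1 then pvWalkBack x1 y1 x (y + 1) acc'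
    else pvWalkBack x1 y1 x (y - 1) acc'
termination_by (x - x1).natAbs + (y - y1).natAbs
decreasing_by all_goals omega

def get_cells_in_arc_py_alt (start : Int × Int) (end_ : Int × Int) : List (Int × Int) :=
  let x1 := start.1; let y1 := start.2
  let x2 := end_.1; let y2 := end_.2
  if x1 ≠ x2 ∧ y1 ≠ y2 then []
  else ((pvWalkBack x1 y1 x2 y2 []) ++ [(x1, y1)]).reverse

-- ===== PRECONDITION & SPEC =====
def Spec_get_cells_in_arc_py (start : Int × Int) (end_ : Int × Int) (out : List (Int × Int)) : Prop := out = get_cells_in_arc_py_alt start end_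
instance (start : Int × Int) (end_ : Int × Int) (out : List (Int × Int)) : Decidable (Spec_get_cells_in_arc_py start end_ out) := by unfold Spec_get_cells_in_arc_py; infer_instance

-- ===== CLAIM =====
def Claim_equal_get_cells_in_arc_py : Prop := ∀ (start : Int × Int) (end_ : Int × Int), Dom_get_cells_in_arc_py start end_ → Spec_get_cells_in_arc_py start end_ (get_cells_in_arc_py start end_)

-- ===== LEMMAS AND PROOFS =====

lemma rev_map_range {α : Type} (f : Nat → α) (d : Nat) :
    ((List.range d).map f).reverse = (List.range d).map (fun k => f (d - 1 - k)) := by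
  apply List.ext_getElem
  · simp
  · intro i h1 h2
    simp only [List.length_reverse, List.length_map, List.length_range] at h1
    simp [List.getElem_reverse, List.getElem_map, List.getElem_range]

lemma walk_right (x1 y : Int) (d : Nat) : ∀ acc,
    pvWalkBack x1 y (x1 + d) y acc = acc ++ (List.range d).map (fun (k : Nat) => (x1 + (d : Int) - (k : Int), y)) := by
  induction d with
  | zero => intro acc; rw [pvWalkBack]; simp
  | succ d ih =>
    intro acc
    have h1 : ¬ (x1 + ((d : Nat) + 1 : Nat) = x1 ∧ y = y) := by push_cast; omega
    have h2 : ¬ (x1 + ((d : Nat) + 1 : Nat) < x1) := by push_cast; omega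
    have h3 : x1 < x1 + ((d : Nat) + 1 : Nat) := by push_cast; omega
    rw [pvWalkBack, if_neg h1]
    simp only [if_neg h2, if_pos h3]
    have he : x1 + ((d : Nat) + 1 : Nat) - 1 = x1 + (d : Int) := by push_cast; ring
    rw [he, ih, List.range_succ_eq_map, List.map_cons, List.map_map,
        List.append_assoc, List.singleton_append]
    congr 1
    refine List.ext_getElem (by simp) ?_
    intro i hi1 hi2
    rcases i with _ | i
    · simp
    · simp only [List.getElem_cons_succ, List.getElem_map, List.getElem_range,
        Function.comp_apply, Prod.mk.injEq]
      exact ⟨by push_cast; ring, by trivial⟩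

lemma walk_left (x1 y : Int) (d : Nat) : ∀ acc,
    pvWalkBack x1 y (x1 - d) y acc = acc ++ (List.range d).map (fun (k : Nat) => (x1 - (d : Int) + (k : Int), y)) := by
  induction d with
  | zero => intro acc; rw [pvWalkBack]; simp
  | succ d ih =>
    intro acc
    have h1 : ¬ (x1 - ((d : Nat) + 1 : Nat) = x1 ∧ y = y) := by push_cast; omega
    have h2 : x1 - ((d : Nat) + 1 : Nat) < x1 := by push_cast; omega
    rw [pvWalkBack, if_neg h1]
    simp only [if_pos h2]
    have he : x1 - ((d : Nat) + 1 : Nat) + 1 = x1 - (d : Int) := by push_cast; ring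
    rw [he, ih, List.range_succ_eq_map, List.map_cons, List.map_map,
        List.append_assoc, List.singleton_append]
    congr 1
    refine List.ext_getElem (by simp) ?_
    intro i hi1 hi2
    rcases i with _ | i
    · simp
    · simp only [List.getElem_cons_succ, List.getElem_map, List.getElem_range,
        Function.comp_apply, Prod.mk.injEq]
      exact ⟨by push_cast; ring, by trivial⟩

lemma walk_up (x y1 : Int) (d : Nat) : ∀ acc,
    pvWalkBack x y1 x (y1 + d) acc = acc ++ (List.range d).map (fun (k : Nat) => (x, y1 + (d : Int) - (k : Int))) := by
  induction d with
  | zero => intro acc; rw [pvWalkBack]; simp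
  | succ d ih =>
    intro acc
    have h1 : ¬ (x = x ∧ y1 + ((d : Nat) + 1 : Nat) = y1) := by push_cast; omega
    have h2 : ¬ (y1 + ((d : Nat) + 1 : Nat) < y1) := by push_cast; omega
    have h3 : y1 < y1 + ((d : Nat) + 1 : Nat) := by push_cast; omega
    rw [pvWalkBack, if_neg h1]
    simp only [if_neg (lt_irrefl x), if_neg h2]
    have he : y1 + ((d : Nat) + 1 : Nat) - 1 = y1 + (d : Int) := by push_cast; ring
    rw [he, ih, List.range_succ_eq_map, List.map_cons, List.map_map,
        List.append_assoc, List.singleton_append]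
    congr 1
    refine List.ext_getElem (by simp) ?_
    intro i hi1 hi2
    rcases i with _ | i
    · simp
    · simp only [List.getElem_cons_succ, List.getElem_map, List.getElem_range,
        Function.comp_apply, Prod.mk.injEq]
      exact ⟨by trivial, by push_cast; ring⟩

lemma walk_down (x y1 : Int) (d : Nat) : ∀ acc,
    pvWalkBack x y1 x (y1 - d) acc = acc ++ (List.range d).map (fun (k : Nat) => (x, y1 - (d : Int) + (k : Int))) := by
  induction d with
  | zero => intro acc; rw [pvWalkBack]; simp
  | succ d ih =>
    intro acc
    have h1 : ¬ (x = x ∧ y1 - ((d : Nat) + 1 : Nat) = y1) := by push_cast; omega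
    have h2 : y1 - ((d : Nat) + 1 : Nat) < y1 := by push_cast; omega
    rw [pvWalkBack, if_neg h1]
    simp only [if_neg (lt_irrefl x), if_pos h2]
    have he : y1 - ((d : Nat) + 1 : Nat) + 1 = y1 - (d : Int) := by push_cast; ring
    rw [he, ih, List.range_succ_eq_map, List.map_cons, List.map_map,
        List.append_assoc, List.singleton_append]
    congr 1
    refine List.ext_getElem (by simp) ?_
    intro i hi1 hi2
    rcases i with _ | i
    · simp
    · simp only [List.getElem_cons_succ, List.getElem_map, List.getElem_range,
        Function.comp_apply, Prod.mk.injEq]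
      exact ⟨by trivial, by push_cast; ring⟩

-- ===== VERDICT =====
theorem get_cells_in_arc_py_spec : Claim_equal_get_cells_in_arc_py := by
  intro start end_ _
  unfold Spec_get_cells_in_arc_py get_cells_in_arc_py get_cells_in_arc_py_alt
  obtain ⟨x1, y1⟩ := start
  obtain ⟨x2, y2⟩ := end_
  by_cases hy : y1 = y2
  · subst hy
    rw [if_pos (rfl : y1 = y1), if_neg (by omega : ¬ (x1 ≠ x2 ∧ y1 ≠ y1))]
    by_cases hx : x2 > x1
    · -- horizontal, increasing
      set d : Nat := (x2 - x1).toNat with hd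
      have hx2 : x2 = x1 + (d : Int) := by omega
      rw [if_pos hx, hx2, walk_right]
      dsimp only
      rw [PySem.List.pyRange_one, PySem.List.foldl_append_singleton_eq_map]
      have hn : (x1 + (d : Int) + 1 - x1).toNat = d + 1 := by omega
      rw [hn, List.nil_append, List.nil_append, List.reverse_append, List.reverse_singleton,
          rev_map_range, List.map_map, List.range_succ_eq_map, List.map_cons, List.map_map]
      simp only [List.singleton_append, Function.comp_apply]
      refine List.ext_getElem (by simp) ?_
      intro i hi1 hi2
      rcases i with _ | i
      · simp
      · simp only [List.getElem_cons_succ, List.getElem_map, List.getElem_range,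
          Function.comp_apply, Prod.mk.injEq]
        have hlen : i < d := by simpa using hi2
        exact ⟨by omega, by trivial⟩
    · -- horizontal, x2 ≤ x1 (includes x2 = x1)
      set d : Nat := (x1 - x2).toNat with hd
      have hx2 : x2 = x1 - (d : Int) := by omega
      rw [if_neg hx, hx2, walk_left]
      dsimp only
      rw [PySem.List.pyRange_neg_one, PySem.List.foldl_append_singleton_eq_map]
      have hn : (x1 - (x1 - (d : Int) + -1)).toNat = d + 1 := by omega
      rw [hn, List.nil_append, List.nil_append, List.reverse_append, List.reverse_singleton,
          rev_map_range, List.map_map, List.range_succ_eq_map, List.map_cons, List.map_map]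
      simp only [List.singleton_append, Function.comp_apply]
      refine List.ext_getElem (by simp) ?_
      intro i hi1 hi2
      rcases i with _ | i
      · simp
      · simp only [List.getElem_cons_succ, List.getElem_map, List.getElem_range,
          Function.comp_apply, Prod.mk.injEq]
        have hlen : i < d := by simpa using hi2
        exact ⟨by omega, by trivial⟩
  · rw [if_neg hy]
    by_cases hxe : x1 = x2
    · subst hxe
      rw [if_pos (rfl : x1 = x1), if_neg (by omega : ¬ (x1 ≠ x1 ∧ y1 ≠ y2))]
      by_cases hv : y2 > y1
      · -- vertical, increasing
        set d : Nat := (y2 - y1).toNat with hd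
        have hy2 : y2 = y1 + (d : Int) := by omega
        rw [if_pos hv, hy2, walk_up]
        dsimp only
        rw [PySem.List.pyRange_one, PySem.List.foldl_append_singleton_eq_map]
        have hn : (y1 + (d : Int) + 1 - y1).toNat = d + 1 := by omega
        rw [hn, List.nil_append, List.nil_append, List.reverse_append, List.reverse_singleton,
            rev_map_range, List.map_map, List.range_succ_eq_map, List.map_cons, List.map_map]
        simp only [List.singleton_append, Function.comp_apply]
        refine List.ext_getElem (by simp) ?_
        intro i hi1 hi2
        rcases i with _ | i
        · simp
        · simp only [List.getElem_cons_succ, List.getElem_map, List.getElem_range,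
            Function.comp_apply, Prod.mk.injEq]
          have hlen : i < d := by simpa using hi2
          exact ⟨by trivial, by omega⟩
      · -- vertical, decreasing
        set d : Nat := (y1 - y2).toNat with hd
        have hy2 : y2 = y1 - (d : Int) := by omega
        rw [if_neg hv, hy2, walk_down]
        dsimp only
        rw [PySem.List.pyRange_neg_one, PySem.List.foldl_append_singleton_eq_map]
        have hn : (y1 - (y1 - (d : Int) + -1)).toNat = d + 1 := by omega
        rw [hn, List.nil_append, List.nil_append, List.reverse_append, List.reverse_singleton,
            rev_map_range, List.map_map, List.range_succ_eq_map, List.map_cons, List.map_map]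
        simp only [List.singleton_append, Function.comp_apply]
        refine List.ext_getElem (by simp) ?_
        intro i hi1 hi2
        rcases i with _ | i
        · simp
        · simp only [List.getElem_cons_succ, List.getElem_map, List.getElem_range,
            Function.comp_apply, Prod.mk.injEq]
          have hlen : i < d := by simpa using hi2
          exact ⟨by trivial, by omega⟩
    · rw [if_neg hxe, if_pos ⟨by omega, hy⟩]
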